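-- pv_equiv track=rewrite | github.com/MelvinjoseC/Qc-checking-inventor-app | app.py | contains_subsequence
-- ===== SOURCE A (Python) =====
-- def contains_subsequence(tokens, subseq):
--     if not subseq:
--         return False
--     n = len(subseq)
--     for i in range(len(tokens) - n + 1):
--         if tokens[i:i + n] == subseq:
--             return True
--     return False
-- ===== SOURCE B (Python) =====
-- def contains_subsequence(tokens, subseq):
--     if not subseq:
--         return False
--     n = len(tokens)
--     m = len(subseq)
--     i = 0
--     while i + m <= n:
--         j = 0
--         while j < m and tokens[i + j] == subseq[j]:
--             j += 1
--         if j == m: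
--             return True
--         i += 1
--     return False
-- ===== Notes on version B (the rewrite author's own statement) =====
-- stated objective: alternative
-- what changed: replaces the per-window slice allocation and whole-list comparison by explicit two-index element-wise matching that stops at the first mismatching token, allocating no temporary lists
import Mathlib
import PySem

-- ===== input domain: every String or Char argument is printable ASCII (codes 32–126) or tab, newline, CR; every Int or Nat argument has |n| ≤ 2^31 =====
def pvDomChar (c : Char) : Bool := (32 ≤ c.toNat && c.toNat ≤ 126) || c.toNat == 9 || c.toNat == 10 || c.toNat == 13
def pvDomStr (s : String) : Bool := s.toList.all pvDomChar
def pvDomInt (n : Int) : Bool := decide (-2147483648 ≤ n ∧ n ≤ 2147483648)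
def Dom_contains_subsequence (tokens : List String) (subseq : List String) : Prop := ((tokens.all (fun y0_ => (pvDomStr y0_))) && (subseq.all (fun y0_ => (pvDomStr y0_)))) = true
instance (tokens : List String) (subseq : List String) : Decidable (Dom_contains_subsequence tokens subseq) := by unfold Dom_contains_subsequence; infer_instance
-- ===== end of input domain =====

-- B replaces A's per-window slice-and-compare by explicit two-index element-wise
-- matching with early exit at the first mismatch (no temporary lists); same O(n*m) bound.

-- ===== PORT A =====
-- A: for i in range(len(tokens) - n + 1): if tokens[i:i+n] == subseq: return True
def contains_subsequence (tokens : List String) (subseq : List String) : Bool :=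
  if subseq = [] then false
  else
    let n : Int := subseq.length
    (PySem.List.pyRange 0 ((tokens.length : Int) - n + 1) 1).any
      (fun i => PySem.List.slice tokens (some i) (some (i + n)) == subseq)

-- ===== PORT B =====
-- inner while: j advances while j < m and tokens[i+j] == subseq[j]; returns (j == m)
def pvMatchAt (tokens subseq : List String) (i j : Nat) : Bool :=
  if h : j < subseq.length then
    match tokens[i + j]? with
    | some t => if t == subseq[j] then pvMatchAt tokens subseq i (j + 1) else false
    | none => false
  else true
termination_by subseq.length - j

-- outer while: i advances while i + m ≤ n
def pvSearchFrom (tokens subseq : List String) (i : Nat) : Bool :=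
  if h : i + subseq.length ≤ tokens.length then
    if pvMatchAt tokens subseq i 0 then true
    else pvSearchFrom tokens subseq (i + 1)
  else false
termination_by tokens.length + 1 - i

def contains_subsequence_alt (tokens : List String) (subseq : List String) : Bool :=
  if subseq = [] then false
  else pvSearchFrom tokens subseq 0

-- ===== PRECONDITION & SPEC =====
def Spec_contains_subsequence (tokens : List String) (subseq : List String) (out : Bool) : Prop := out = contains_subsequence_alt tokens subseq
instance (tokens : List String) (subseq : List String) (out : Bool) : Decidable (Spec_contains_subsequence tokens subseq out) := by unfold Spec_contains_subsequence; infer_instance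

-- ===== CLAIM (what is proved, stated in full; the proofs are below) =====
def Claim_equal_contains_subsequence : Prop := ∀ (tokens : List String) (subseq : List String), Dom_contains_subsequence tokens subseq → Spec_contains_subsequence tokens subseq (contains_subsequence tokens subseq)

-- ===== LEMMAS AND PROOFS =====

-- the common characterisation both ports are reduced to
def pvHit (tokens subseq : List String) (i : Nat) : Prop :=
  i + subseq.length ≤ tokens.length ∧ (tokens.drop i).take subseq.length = subseq

theorem pvMatchAt_iff (tokens subseq : List String) (i j : Nat)
    (hle : i + subseq.length ≤ tokens.length) (hj : j ≤ subseq.length) :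
    pvMatchAt tokens subseq i j = true ↔
      (tokens.drop (i + j)).take (subseq.length - j) = subseq.drop j := by
  induction hfuel : subseq.length - j generalizing j with
  | zero =>
    have hj' : j = subseq.length := by omega
    unfold pvMatchAt
    simp [hj']
  | succ d ih =>
    have hjlt : j < subseq.length := by omega
    have hidx : i + j < tokens.length := by omega
    have hget : tokens[i + j]? = some tokens[i + j] := List.getElem?_eq_getElem hidx
    unfold pvMatchAt
    rw [dif_pos hjlt, hget]
    rw [List.drop_eq_getElem_cons hidx, List.drop_eq_getElem_cons hjlt, List.take_succ_cons]
    by_cases heq : tokens[i + j] = subseq[j]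
    · simp only [heq, beq_self_eq_true, if_true]
      rw [ih (j + 1) (by omega) (by omega)]
      have h1 : i + (j + 1) = i + j + 1 := by omega
      rw [h1]
      exact ⟨fun h => by rw [h], fun h => ((List.cons.injEq _ _ _ _).mp h).2⟩
    · have hb : (tokens[i + j] == subseq[j]) = false := by simp [heq]
      simp only [hb, Bool.false_eq_true, if_false, false_iff]
      intro h
      exact heq ((List.cons.injEq _ _ _ _).mp h).1

theorem pvSearchFrom_iff (tokens subseq : List String) (i : Nat) :
    pvSearchFrom tokens subseq i = true ↔ ∃ k, i ≤ k ∧ pvHit tokens subseq k := by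
  induction hfuel : tokens.length + 1 - i generalizing i with
  | zero =>
    have hgt : ¬ (i + subseq.length ≤ tokens.length) := by omega
    unfold pvSearchFrom
    rw [dif_neg hgt]
    simp only [Bool.false_eq_true, false_iff]
    rintro ⟨k, hik, hk1, _⟩
    omega
  | succ d ih =>
    unfold pvSearchFrom
    by_cases hle : i + subseq.length ≤ tokens.length
    · rw [dif_pos hle]
      have hmatch := pvMatchAt_iff tokens subseq i 0 hle (Nat.zero_le _)
      simp only [Nat.add_zero, Nat.sub_zero, List.drop_zero] at hmatch
      by_cases hm : pvMatchAt tokens subseq i 0 = true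
      · simp only [hm, if_true, true_iff]
        exact ⟨i, Nat.le_refl _, hle, hmatch.mp hm⟩
      · rw [if_neg hm, ih (i + 1) (by omega)]
        constructor
        · rintro ⟨k, hik, hk⟩; exact ⟨k, by omega, hk⟩
        · rintro ⟨k, hik, hk⟩
          refine ⟨k, ?_, hk⟩
          rcases Nat.eq_or_lt_of_le hik with rfl | h
          · exact absurd (hmatch.mpr hk.2) hm
          · omega
    · rw [dif_neg hle]
      simp only [Bool.false_eq_true, false_iff]
      rintro ⟨k, hik, hk1, _⟩
      omega

theorem portA_iff (tokens subseq : List String) (hne : subseq ≠ []) :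
    contains_subsequence tokens subseq = true ↔ ∃ k, pvHit tokens subseq k := by
  unfold contains_subsequence
  rw [if_neg hne]
  simp only [List.any_eq_true, PySem.List.mem_pyRange_one, beq_iff_eq]
  constructor
  · rintro ⟨x, ⟨hx0, hxlt⟩, hslice⟩
    obtain ⟨k, rfl⟩ := Int.eq_ofNat_of_zero_le hx0
    rw [PySem.List.slice_natCast_add] at hslice
    exact ⟨k, by omega, hslice⟩
  · rintro ⟨k, hkle, hwin⟩
    refine ⟨(k : Int), ⟨by omega, by omega⟩, ?_⟩
    rw [PySem.List.slice_natCast_add]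
    exact hwin

-- ===== VERDICT (by name: the statement is the Claim_ definition above) =====
theorem contains_subsequence_spec : Claim_equal_contains_subsequence := by
  intro tokens subseq _
  unfold Spec_contains_subsequence
  by_cases hs : subseq = []
  · simp [contains_subsequence, contains_subsequence_alt, hs]
  · have hA := portA_iff tokens subseq hs
    have hB : contains_subsequence_alt tokens subseq = true ↔ ∃ k, pvHit tokens subseq k := by
      rw [contains_subsequence_alt, if_neg hs, pvSearchFrom_iff]
      constructor
      · rintro ⟨k, _, hk⟩; exact ⟨k, hk⟩
      · rintro ⟨k, hk⟩; exact ⟨k, Nat.zero_le _, hk⟩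
    cases hA' : contains_subsequence tokens subseq <;>
      cases hB' : contains_subsequence_alt tokens subseq <;> simp_all
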